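-- pv_equiv track=rewrite | github.com/miguelneto0/csp_scripts | mdd_from_table.py | compress_table
-- ===== SOURCE A (Python) =====
-- def compress_table(std_table):
--     """ Gera a tabela compacta (compressed table) a partir da tabela standard (std_table) """
--     compressed_table = []
--
--     # Itera pelas colunas (índices das colunas)
--     for col_idx in range(len(std_table[0])):  # Número de colunas na primeira linha
--         unique_values = set()  # Para armazenar valores únicos dessa coluna
--
--         # Itera pelas linhas e coleta valores da coluna atual
--         for row in std_table:
--             unique_values.add(row[col_idx])
--
--         # Adiciona os valores únicos como uma lista para a tabela compactada
--         compressed_table.append(sorted(unique_values))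
--
--     # Transforma em formato de lista de listas
--     return [[list(column) for column in compressed_table]]
-- ===== SOURCE B (Python) =====
-- def insert_unique(lst, v):
--     """Insert v into a sorted duplicate-free list, keeping it sorted and duplicate-free."""
--     if not lst:
--         return [v]
--     x = lst[0]
--     if x < v:
--         return [x] + insert_unique(lst[1:], v)
--     if x != v:
--         return [v] + lst
--     return lst
--
-- def compress_table(std_table):
--     """ Gera a tabela compacta (compressed table) a partir da tabela standard (std_table) """
--     acc = [[] for _ in std_table[0]]
--     for row in std_table:
--         acc = [insert_unique(lst, v) for lst, v in zip(acc, row)]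
--     return [acc]
-- ===== Notes on version B (the rewrite author's own statement) =====
-- stated objective: alternative
-- what changed: Replaces A's per-column collect-into-set-then-sort (column-index outer loop, row inner scan, sorted(set)) by a single streaming pass over the rows that maintains one sorted duplicate-free list per column via online sorted insertion; no set and no sort call remain.
import Mathlib
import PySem

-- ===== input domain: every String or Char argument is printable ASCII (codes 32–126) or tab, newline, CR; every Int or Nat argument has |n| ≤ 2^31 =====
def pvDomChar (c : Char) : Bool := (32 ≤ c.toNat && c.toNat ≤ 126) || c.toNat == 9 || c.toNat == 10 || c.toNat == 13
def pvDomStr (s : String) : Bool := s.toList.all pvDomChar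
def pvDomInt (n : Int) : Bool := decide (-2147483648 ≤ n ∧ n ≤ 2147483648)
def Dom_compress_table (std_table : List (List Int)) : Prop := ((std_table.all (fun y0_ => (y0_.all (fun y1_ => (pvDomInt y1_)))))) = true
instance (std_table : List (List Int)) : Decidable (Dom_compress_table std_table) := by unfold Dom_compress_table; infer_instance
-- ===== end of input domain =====

-- B replaces A's per-column set-then-sort by one streaming pass over the rows, maintaining a
-- sorted duplicate-free list per column via online sorted insertion (alternative algorithm).

-- ===== PORT A =====
-- literal port of A: iterate column indices of the first row, inner scan over rows into a set, sort each set
def compress_table (std_table : List (List Int)) : List (List (List Int)) :=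
  let compressed_table : List (List Int) :=
    (PySem.List.pyRange 0 ((std_table.headD []).length : Int) 1).foldl
      (fun acc col_idx =>
        let unique_values : PySem.Set Int :=
          std_table.foldl (fun s row => s.add (PySem.List.pyGetD row col_idx 0)) PySem.Set.empty
        acc ++ [PySem.List.sorted unique_values (fun x => x) false]) []
  [compressed_table.map (fun column => column)]

-- ===== PORT B =====
-- insert_unique: insert v into a sorted duplicate-free list, keeping it sorted and duplicate-free
def insertUnique : List Int → Int → List Int
  | [], v => [v]
  | x :: xs, v =>
    if x < v then x :: insertUnique xs v
    else if x ≠ v then v :: x :: xs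
    else x :: xs

-- one pass over the rows; each row is merged column-wise (zip truncates) into the accumulator
def compress_table_alt (std_table : List (List Int)) : List (List (List Int)) :=
  let acc0 : List (List Int) := (std_table.headD []).map (fun _ => ([] : List Int))
  let acc := std_table.foldl
    (fun acc row => (acc.zip row).map (fun p => insertUnique p.1 p.2)) acc0
  [acc]

-- ===== PRECONDITION & SPEC =====
-- Pre_: exactly the inputs where A returns normally — a nonempty table whose first row is no longer
-- than any other row (otherwise std_table[0] or row[col_idx] raises IndexError).
def Pre_compress_table (std_table : List (List Int)) : Prop :=
  std_table ≠ [] ∧ ∀ r ∈ std_table, (std_table.headD []).length ≤ r.length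
instance (std_table : List (List Int)) : Decidable (Pre_compress_table std_table) := by
  unfold Pre_compress_table; infer_instance
def pvWitness_compress_table : List (List Int) := [[1, 2], [3, 2], [1, 5]]

def Spec_compress_table (std_table : List (List Int)) (out : List (List (List Int))) : Prop :=
  out = compress_table_alt std_table
instance (std_table : List (List Int)) (out : List (List (List Int))) : Decidable (Spec_compress_table std_table out) := by
  unfold Spec_compress_table; infer_instance

-- ===== CLAIM (what is proved, stated in full; the proofs are below) =====
def Claim_equal_compress_table : Prop := ∀ (std_table : List (List Int)), Dom_compress_table std_table → Pre_compress_table std_table → Spec_compress_table std_table (compress_table std_table)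
-- ===== LEMMAS AND PROOFS =====

-- the set built by A's inner row loop is set(column-entries)
theorem pv_set_foldl (t : List (List Int)) (g : List Int → Int) :
    t.foldl (fun (s : PySem.Set Int) row => s.add (g row)) PySem.Set.empty
      = PySem.Set.ofList (t.map g) := by
  rw [← PySem.Set.update_map_eq_foldl_add]
  exact PySem.Set.update_empty _

-- membership after insertUnique
theorem pv_iu_mem : ∀ (l : List Int) (v b : Int), b ∈ insertUnique l v ↔ b = v ∨ b ∈ l := by
  intro l
  induction l with
  | nil => intro v b; simp [insertUnique]
  | cons x xs ih =>
    intro v b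
    by_cases h1 : x < v
    · simp only [insertUnique, if_pos h1, List.mem_cons, ih]
      tauto
    · by_cases h2 : x = v
      · subst h2
        simp only [insertUnique, if_neg h1, ne_eq, not_true_eq_false, if_false, List.mem_cons]
        tauto
      · simp only [insertUnique, if_neg h1, ne_eq, if_pos h2, List.mem_cons]

-- insertUnique on a strictly sorted list stays strictly sorted
theorem pv_iu_pairwise : ∀ (l : List Int) (v : Int), l.Pairwise (· < ·) →
    (insertUnique l v).Pairwise (· < ·) := by
  intro l
  induction l with
  | nil => intro v _; simp [insertUnique]
  | cons x xs ih =>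
    intro v hp
    rcases List.pairwise_cons.mp hp with ⟨hx, hxs⟩
    by_cases h1 : x < v
    · simp only [insertUnique, if_pos h1]
      refine List.pairwise_cons.mpr ⟨?_, ih v hxs⟩
      intro b hb
      rcases (pv_iu_mem xs v b).mp hb with rfl | hbx
      · exact h1
      · exact hx _ hbx
    · by_cases h2 : x = v
      · subst h2
        simpa only [insertUnique, if_neg h1, ne_eq, not_true_eq_false, if_false] using hp
      · have hxv : v < x := by omega
        simp only [insertUnique, if_neg h1, ne_eq, if_pos h2]
        refine List.pairwise_cons.mpr ⟨?_, hp⟩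
        intro b hb
        rcases List.mem_cons.mp hb with rfl | hbx
        · exact hxv
        · exact lt_trans hxv (hx _ hbx)

-- insertUnique is a permutation of Set.add on strictly sorted lists
theorem pv_iu_perm : ∀ (l : List Int) (v : Int), l.Pairwise (· < ·) →
    (insertUnique l v).Perm (PySem.Set.add l v) := by
  intro l
  induction l with
  | nil => intro v _; simp [insertUnique, PySem.Set.add, PySem.Set.contains]
  | cons x xs ih =>
    intro v hp
    rcases List.pairwise_cons.mp hp with ⟨hx, hxs⟩
    by_cases h1 : x < v
    · have hxv : ¬ v = x := by omega
      have hadd : PySem.Set.add (x :: xs) v = x :: PySem.Set.add xs v := by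
        by_cases hv : v ∈ xs
        · have : v ∈ x :: xs := List.mem_cons_of_mem _ hv
          simp [PySem.Set.add, PySem.Set.contains, hv, this]
        · have : ¬ v ∈ x :: xs := by simp [hxv, hv]
          simp [PySem.Set.add, PySem.Set.contains, hv, this]
      rw [hadd]
      simp only [insertUnique, if_pos h1]
      exact List.Perm.cons x (ih v hxs)
    · by_cases h2 : x = v
      · subst h2
        have hv : x ∈ x :: xs := List.mem_cons_self
        simp only [insertUnique, if_neg h1, ne_eq, not_true_eq_false, if_false]
        simp [PySem.Set.add, PySem.Set.contains, hv]
      · have hnv : ¬ v ∈ x :: xs := by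
          intro hmem
          rcases List.mem_cons.mp hmem with rfl | hvx
          · exact h2 rfl
          · exact absurd (hx _ hvx) h1
        have hadd : PySem.Set.add (x :: xs) v = (x :: xs) ++ [v] := by
          simp [PySem.Set.add, PySem.Set.contains, hnv]
        rw [hadd]
        simp only [insertUnique, if_neg h1, ne_eq, if_pos h2]
        exact (List.perm_append_singleton v (x :: xs)).symm

-- the row-fold, read column-wise
theorem pv_fold_cols : ∀ (t : List (List Int)) (acc : List (List Int)),
    (∀ r ∈ t, acc.length ≤ r.length) →
    t.foldl (fun acc row => (acc.zip row).map (fun p => insertUnique p.1 p.2)) acc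
      = (List.range acc.length).map
          (fun k => (t.map (fun r => r.getD k 0)).foldl insertUnique (acc.getD k [])) := by
  intro t
  induction t with
  | nil =>
    intro acc _
    simp only [List.foldl_nil, List.map_nil]
    apply List.ext_getElem
    · simp
    · intro k h1 h2
      simp [List.getD_eq_getElem?_getD, h1]
  | cons r rs ih =>
    intro acc hall
    have hlen : acc.length ≤ r.length := hall r List.mem_cons_self
    have hstep_len : ((acc.zip r).map (fun p => insertUnique p.1 p.2)).length = acc.length := by
      simp; omega
    rw [List.foldl_cons,
        ih _ (by intro r' hr'; rw [hstep_len]; exact hall r' (List.mem_cons_of_mem _ hr')),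
        hstep_len]
    apply List.map_congr_left
    intro k hk
    rw [List.mem_range] at hk
    simp only [List.map_cons, List.foldl_cons]
    congr 1
    have hk2 : k < (acc.zip r).length := by simp; omega
    rw [List.getD_eq_getElem _ _ (by simpa using hk2)]
    simp only [List.getElem_map, List.getElem_zip]
    rw [List.getD_eq_getElem _ _ hk, List.getD_eq_getElem _ _ (by omega)]

-- folding insertUnique over a column: sorted, and a permutation of the Set.add fold
theorem pv_col_sorted : ∀ (xs : List Int) (a1 a2 : List Int), a1.Pairwise (· < ·) → a1.Perm a2 →
    (xs.foldl insertUnique a1).Pairwise (· < ·) ∧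
    (xs.foldl insertUnique a1).Perm (xs.foldl PySem.Set.add a2) := by
  intro xs
  induction xs with
  | nil => intro a1 a2 h hp; exact ⟨h, hp⟩
  | cons v vs ih =>
    intro a1 a2 h hp
    simp only [List.foldl_cons]
    apply ih
    · exact pv_iu_pairwise a1 v h
    · refine (pv_iu_perm a1 v h).trans ?_
      by_cases hv : v ∈ a1
      · have hv2 : v ∈ a2 := hp.mem_iff.mp hv
        rw [show PySem.Set.add a1 v = a1 by simp [PySem.Set.add, PySem.Set.contains, hv],
            show PySem.Set.add a2 v = a2 by simp [PySem.Set.add, PySem.Set.contains, hv2]]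
        exact hp
      · have hv2 : ¬ v ∈ a2 := fun h2 => hv (hp.mem_iff.mpr h2)
        rw [show PySem.Set.add a1 v = a1 ++ [v] by simp [PySem.Set.add, PySem.Set.contains, hv],
            show PySem.Set.add a2 v = a2 ++ [v] by simp [PySem.Set.add, PySem.Set.contains, hv2]]
        exact hp.append (List.Perm.refl [v])

-- ===== VERDICT =====
theorem compress_table_spec : Claim_equal_compress_table := by
  intro t _ hpre
  unfold Spec_compress_table compress_table compress_table_alt
  dsimp only
  rw [pv_fold_cols t _ (by intro r hr; simpa using hpre.2 r hr)]
  simp only [List.length_map]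
  simp only [PySem.List.foldl_append_singleton_eq_map, List.nil_append, List.map_map,
    Function.comp_def, pv_set_foldl, PySem.List.pyRange_zero_natCast, PySem.List.pyGetD_natCast]
  congr 1
  apply List.map_congr_left
  intro k hk
  rw [List.mem_range] at hk
  have hacc0 : ((t.headD []).map (fun _ => ([] : List Int))).getD k [] = [] := by
    rw [List.getD_eq_getElem _ _ (by simpa using hk)]
    simp
  rw [hacc0]
  obtain ⟨hpw, hperm⟩ :=
    pv_col_sorted (t.map (fun r => r.getD k 0)) [] [] (by simp) (List.Perm.refl _)
  rw [← PySem.Set.ofList_eq_foldl] at hperm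
  exact PySem.List.sorted_eq_of_perm_of_pairwise_lt _ _ _ hperm hpw
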